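-- pv_equiv track=rewrite | github.com/sertman1/substiution-ranking | twogramparser.py | tokenize_candidates
-- ===== SOURCE A (Python) =====
-- def tokenize_candidates(candidates):
--     list_of_candidates = list()
--     candidate = ""
--     for c in candidates[0]:
--         if c != ';' and c != '\n':
--             candidate += c
--         else:
--             list_of_candidates.append(candidate.strip())
--             candidate = ""
--     list_of_candidates.append(candidate.strip())
--     return list_of_candidates
-- ===== SOURCE B (Python) =====
-- def tokenize_candidates(candidates):
--     return [piece.strip() for piece in candidates[0].replace('\n', ';').split(';')]
-- ===== Notes on version B (the rewrite author's own statement) =====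
-- stated objective: idiomatic
-- what changed: Replaces the character-by-character accumulator loop (flush on each delimiter) with a split-based decomposition: normalize '\n' to ';', split once on ';', then strip each piece in a comprehension.
import Mathlib
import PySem

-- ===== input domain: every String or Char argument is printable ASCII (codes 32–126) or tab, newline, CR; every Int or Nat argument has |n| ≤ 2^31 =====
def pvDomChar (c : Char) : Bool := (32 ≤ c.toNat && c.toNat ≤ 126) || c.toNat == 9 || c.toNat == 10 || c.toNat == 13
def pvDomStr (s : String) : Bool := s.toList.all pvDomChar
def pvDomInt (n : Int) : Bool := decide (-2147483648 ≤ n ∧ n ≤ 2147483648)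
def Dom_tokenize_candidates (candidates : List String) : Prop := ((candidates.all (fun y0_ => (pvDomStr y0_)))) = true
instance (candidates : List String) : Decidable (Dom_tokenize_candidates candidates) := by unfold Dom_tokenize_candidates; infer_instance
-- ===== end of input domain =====

-- B replaces A's character-by-character accumulator loop by normalize('\n'→';') + split(';') + strip each piece (idiomatic decomposition; return value only).

-- ===== PORT A =====
def tokenize_candidates (candidates : List String) : List String :=
  match PySem.List.pyGet? candidates 0 with
  | none => []   -- candidates[0] raises IndexError; excluded by Pre_
  | some s =>
    let st := s.toList.foldl
      (fun (st : List String × String) c =>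
        if c ≠ ';' ∧ c ≠ '\n' then (st.1, st.2.push c)
        else (st.1 ++ [PySem.Str.strip st.2], ""))
      ([], "")
    st.1 ++ [PySem.Str.strip st.2]

-- ===== PORT B =====
def tokenize_candidates_alt (candidates : List String) : List String :=
  match PySem.List.pyGet? candidates 0 with
  | none => []   -- candidates[0] raises IndexError; excluded by Pre_
  | some s =>
    ((PySem.Str.split? (PySem.Str.replace s "\n" ";") ";").getD []).map PySem.Str.strip

-- ===== PRECONDITION & SPEC =====
-- Pre_ excludes only the empty list, on which A raises IndexError (candidates[0]).
def Pre_tokenize_candidates (candidates : List String) : Prop := candidates ≠ []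
instance (candidates : List String) : Decidable (Pre_tokenize_candidates candidates) := by unfold Pre_tokenize_candidates; infer_instance
def pvWitness_tokenize_candidates : List String := ["a; b\nc"]
def Spec_tokenize_candidates (candidates : List String) (out : List String) : Prop := out = tokenize_candidates_alt candidates
instance (candidates : List String) (out : List String) : Decidable (Spec_tokenize_candidates candidates out) := by unfold Spec_tokenize_candidates; infer_instance

-- ===== CLAIM (what is proved, stated in full; the proofs are below) =====
def Claim_equal_tokenize_candidates : Prop := ∀ (candidates : List String), Dom_tokenize_candidates candidates → Pre_tokenize_candidates candidates → Spec_tokenize_candidates candidates (tokenize_candidates candidates)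

-- ===== LEMMAS AND PROOFS =====

-- A's delimiter test, as a pure splitter: split cs at chars ';' or '\n', piece in progress = pre.
def pvSplit2 (pre : List Char) : List Char → List (List Char)
  | [] => [pre]
  | c :: t => if c = ';' ∨ c = '\n' then pre :: pvSplit2 [] t else pvSplit2 (pre ++ [c]) t

def pvSubst (c : Char) : Char := if c = '\n' then ';' else c

lemma pvReplace_go (fuel : ℕ) : ∀ (l acc : List Char), l.length ≤ fuel →
    PySem.Chars.replace.go ['\n'] [';'] fuel l acc = acc.reverse ++ l.map pvSubst := by
  induction fuel with
  | zero =>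
    intro l acc h
    have : l = [] := List.eq_nil_of_length_eq_zero (Nat.le_zero.mp h)
    subst this; simp [PySem.Chars.replace.go]
  | succ n ih =>
    intro l acc h
    cases l with
    | nil => simp [PySem.Chars.replace.go]
    | cons c t =>
      simp only [PySem.Chars.replace.go, List.isPrefixOf]
      by_cases hc : c = '\n'
      · subst hc
        rw [if_pos (by simp)]
        simp only [List.length_cons, List.length_nil, List.drop_succ_cons, List.drop_zero]
        rw [ih t _ (by simpa using Nat.le_of_succ_le_succ h)]
        simp [pvSubst]
      · rw [if_neg (by simp; exact fun he => hc he.symm)]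
        rw [ih t (c :: acc) (by simpa using Nat.le_of_succ_le_succ h)]
        simp [pvSubst, hc]

lemma pvReplace (cs : List Char) :
    PySem.Chars.replace cs ['\n'] [';'] = cs.map pvSubst := by
  simp only [PySem.Chars.replace, List.isEmpty_cons, if_neg Bool.false_ne_true]
  exact pvReplace_go cs.length cs [] le_rfl

-- splitOn with single-char separator, via pvSplit over that one delimiter
def pvSplit1 (pre : List Char) : List Char → List (List Char)
  | [] => [pre]
  | c :: t => if c = ';' then pre :: pvSplit1 [] t else pvSplit1 (pre ++ [c]) t

lemma pvSplitOn_go (fuel : ℕ) : ∀ (l cur : List Char) (acc : List (List Char)), l.length < fuel →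
    PySem.Chars.splitOn.go [';'] fuel l cur acc = acc.reverse ++ pvSplit1 cur.reverse l := by
  induction fuel with
  | zero => intro l cur acc h; omega
  | succ n ih =>
    intro l cur acc h
    cases l with
    | nil => simp [PySem.Chars.splitOn.go, pvSplit1]
    | cons c t =>
      simp only [PySem.Chars.splitOn.go, List.isPrefixOf]
      by_cases hc : c = ';'
      · subst hc
        rw [if_pos (by simp)]
        simp only [List.length_cons, List.length_nil, List.drop_succ_cons, List.drop_zero]
        rw [ih t [] (cur.reverse :: acc) (by simpa using Nat.lt_of_succ_lt_succ h)]
        simp [pvSplit1]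
      · rw [if_neg (by simp; exact fun he => hc he.symm)]
        rw [ih t (c :: cur) acc (by simpa using Nat.lt_of_succ_lt_succ h)]
        simp [pvSplit1, hc]

lemma pvSplitOn (cs : List Char) :
    PySem.Chars.splitOn cs [';'] = pvSplit1 [] cs := by
  simp only [PySem.Chars.splitOn]
  rw [pvSplitOn_go (cs.length + 1) cs [] [] (Nat.lt_succ_self _)]
  simp

-- splitting the '\n'→';' image on ';' = splitting the original on both delimiters
lemma pvSplit1_map (cs : List Char) : ∀ pre,
    pvSplit1 pre (cs.map pvSubst) = pvSplit2 pre cs := by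
  induction cs with
  | nil => intro pre; simp [pvSplit1, pvSplit2]
  | cons c t ih =>
    intro pre
    by_cases hc : c = ';' ∨ c = '\n'
    · have : pvSubst c = ';' := by rcases hc with h | h <;> simp [pvSubst, h]
      simp [pvSplit1, pvSplit2, this, hc, ih]
    · have h1 : pvSubst c = c := by
        simp [pvSubst]; intro h; exact absurd (Or.inr h) hc
      have h2 : c ≠ ';' := fun h => hc (Or.inl h)
      have h3 : c ≠ '\n' := fun h => hc (Or.inr h)
      simp [pvSplit1, pvSplit2, h1, h2, h3, ih]

-- A's loop computes acc ++ the stripped pieces of the splitter, the piece in progress being cand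
lemma pvLoop (cs : List Char) : ∀ (acc : List String) (cand : String),
    (cs.foldl
      (fun (st : List String × String) c =>
        if c ≠ ';' ∧ c ≠ '\n' then (st.1, st.2.push c)
        else (st.1 ++ [PySem.Str.strip st.2], ""))
      (acc, cand)).1 ++
      [PySem.Str.strip (cs.foldl
        (fun (st : List String × String) c =>
          if c ≠ ';' ∧ c ≠ '\n' then (st.1, st.2.push c)
          else (st.1 ++ [PySem.Str.strip st.2], ""))
        (acc, cand)).2] =
    acc ++ (pvSplit2 cand.toList cs).map (fun t => PySem.Str.strip (String.ofList t)) := by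
  induction cs with
  | nil => intro acc cand; simp [pvSplit2, String.ofList_toList]
  | cons c t ih =>
    intro acc cand
    by_cases hc : c = ';' ∨ c = '\n'
    · have hn : ¬ (c ≠ ';' ∧ c ≠ '\n') := by tauto
      simp only [List.foldl_cons, if_neg hn]
      rw [ih]
      simp [pvSplit2, hc, String.ofList_toList]
    · have hp : c ≠ ';' ∧ c ≠ '\n' := by tauto
      simp only [List.foldl_cons, if_pos hp]
      rw [ih]
      have : (cand.push c).toList = cand.toList ++ [c] := by simp
      rw [this]
      simp [pvSplit2, hc]

-- ===== VERDICT (by name: the statement is the Claim_ definition above) =====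
theorem tokenize_candidates_spec : Claim_equal_tokenize_candidates := by
  intro candidates _ _
  unfold Spec_tokenize_candidates tokenize_candidates tokenize_candidates_alt
  cases h : PySem.List.pyGet? candidates 0 with
  | none => rfl
  | some s =>
    simp only
    have hx : (PySem.Str.replace s "\n" ";").toList = s.toList.map pvSubst := by
      rw [PySem.Str.toList_replace]
      have : ("\n" : String).toList = ['\n'] := by decide
      have h2 : (";" : String).toList = [';'] := by decide
      rw [this, h2, pvReplace]
    have hsp := PySem.Str.split?_map (PySem.Str.replace s "\n" ";") ";"
    have h2 : (";" : String).toList = [';'] := by decide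
    rw [h2, hx] at hsp
    simp only [PySem.Chars.split?, List.isEmpty_cons, if_neg Bool.false_ne_true] at hsp
    cases hps : PySem.Str.split? (PySem.Str.replace s "\n" ";") ";" with
    | none => rw [hps] at hsp; simp at hsp
    | some ps =>
      rw [hps] at hsp
      simp only [Option.map_some, Option.some.injEq] at hsp
      have hb : ps.map PySem.Str.strip
          = (pvSplit2 [] s.toList).map (fun t => PySem.Str.strip (String.ofList t)) := by
        rw [← pvSplit1_map, ← pvSplitOn, ← hsp, List.map_map]
        apply List.map_congr_left
        intro p _
        simp [String.ofList_toList]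
      have hl := pvLoop s.toList [] ""
      simp only [List.nil_append] at hl
      have he : ("" : String).toList = [] := by decide
      rw [he] at hl
      simp only [Option.getD_some, hb]
      exact hl
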